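-- pv_equiv track=rewrite | github.com/mishrakeshav/Competitive-Programming | binarysearch.io/405_consecutively_decending_integers.py | solve
-- ===== SOURCE A (Python) =====
-- def solve(s):
--     def helper(prev,curr,length):
--         if len(curr) == 0:
--             return True
--         if len(curr) < length - 1:
--             return False
--         if len(curr) >= length:
--             if int(prev) - int(curr[:length]) == 1:
--                 return helper(curr[:length],curr[length:],length)
--         if length == 1:
--             return False
--         if int(prev) - int(curr[:length-1]) == 1:
--             return helper(curr[:length-1], curr[length-1:], length-1)
--         return False
--     length = len(s)//2
--     if len(s)%2:
--         length += 1
--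
--     for i in range(1,length+1):
--         if helper(s[:i],s[i:],i):
--             return True
--     return False
-- ===== SOURCE B (Python) =====
-- def solve(s):
--     n = len(s)
--     for i in range(1, (n + 1) // 2 + 1):
--         if _runs(s, i):
--             return True
--     return False
--
--
-- def _runs(s, i):
--     # Greedy index-based scan: does s, starting with chunk width i, split into
--     # consecutively decreasing integers?  Carries the parsed previous value,
--     # the current position and the current chunk width; never copies the suffix.
--     n = len(s)
--     pos = i
--     if pos >= n:
--         return True
--     prev = int(s[:i])
--     L = i
--     while pos < n:
--         rem = n - pos
--         if rem < L - 1: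
--             return False
--         if rem >= L and prev - int(s[pos:pos + L]) == 1:
--             prev = int(s[pos:pos + L])
--             pos += L
--             continue
--         if L == 1:
--             return False
--         if prev - int(s[pos:pos + L - 1]) == 1:
--             L -= 1
--             prev = int(s[pos:pos + L])
--             pos += L
--             continue
--         return False
--     return True
-- ===== Notes on version B (the rewrite author's own statement) =====
-- stated objective: faster
-- what changed: A's recursive helper re-slices and copies the whole remaining suffix (curr[length:]) at every step; B replaces it with an iterative index-based scan keeping a position, the chunk width and the parsed previous value, slicing only the current chunk (timed faster locally; the harness's random inputs all make A raise, so its a timing run could not measure it).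
-- outside the precondition, e.g. on solve('010 '): A returns True, B returns True
import Mathlib
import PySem

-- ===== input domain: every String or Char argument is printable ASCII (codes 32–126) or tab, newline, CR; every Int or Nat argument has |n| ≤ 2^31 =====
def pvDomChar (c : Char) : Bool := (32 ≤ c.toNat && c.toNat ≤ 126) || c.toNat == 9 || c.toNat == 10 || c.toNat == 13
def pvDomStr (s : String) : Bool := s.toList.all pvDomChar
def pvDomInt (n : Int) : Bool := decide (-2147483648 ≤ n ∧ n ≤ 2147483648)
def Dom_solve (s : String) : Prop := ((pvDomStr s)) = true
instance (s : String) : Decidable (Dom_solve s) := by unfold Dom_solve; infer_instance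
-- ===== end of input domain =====

-- B replaces A's recursive helper (which re-slices and copies the remaining suffix at every
-- step) by an index-based while-loop carrying the parsed previous value, avoiding that copy.

-- shared primitive: Python int(chunk); the getD 0 default is never reached inside Pre_solve
def pyIntChunk (cs : List Char) : Int := (PySem.Int.ofChars? cs).getD 0

-- ===== PORT A =====
-- A's recursive helper(prev, curr, length). `fuel` only bounds the recursion depth so the
-- definition is structural: every recursive call consumes at least one character of curr
-- whenever len_ ≥ 1 (always the case when reached from solve), so fuel = len(s)+1 suffices.
def solveHelperA (fuel : Nat) (prev curr : List Char) (len_ : Nat) : Bool :=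
  match fuel with
  | 0 => false
  | fuel + 1 =>
    if curr.length = 0 then true
    else if curr.length < len_ - 1 then false
    else if len_ ≤ curr.length ∧ pyIntChunk prev - pyIntChunk (curr.take len_) = 1 then
      solveHelperA fuel (curr.take len_) (curr.drop len_) len_
    else if len_ = 1 then false
    else if pyIntChunk prev - pyIntChunk (curr.take (len_ - 1)) = 1 then
      solveHelperA fuel (curr.take (len_ - 1)) (curr.drop (len_ - 1)) (len_ - 1)
    else false

def solve (s : String) : Bool :=
  (List.range' 1 (s.toList.length / 2 + (if s.toList.length % 2 = 1 then 1 else 0))).any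
    (fun i => solveHelperA (s.toList.length + 1) (s.toList.take i) (s.toList.drop i) i)

-- ===== PORT B =====
-- B's while-loop over pos / L / prev on the original string; same fuel bound as above.
def solveLoopB (fuel : Nat) (s : List Char) (prev : Int) (pos L : Nat) : Bool :=
  match fuel with
  | 0 => false
  | fuel + 1 =>
    if pos < s.length then
      if s.length - pos < L - 1 then false
      else if L ≤ s.length - pos ∧ prev - pyIntChunk ((s.drop pos).take L) = 1 then
        solveLoopB fuel s (pyIntChunk ((s.drop pos).take L)) (pos + L) L
      else if L = 1 then false
      else if prev - pyIntChunk ((s.drop pos).take (L - 1)) = 1 then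
        solveLoopB fuel s (pyIntChunk ((s.drop pos).take (L - 1))) (pos + (L - 1)) (L - 1)
      else false
    else true

def solve_alt (s : String) : Bool :=
  (List.range' 1 ((s.toList.length + 1) / 2)).any
    (fun i => if i < s.toList.length
              then solveLoopB (s.toList.length + 1) s.toList (pyIntChunk (s.toList.take i)) i i
              else true)

-- ===== PRECONDITION & SPEC =====
-- Pre_solve excludes strings of length ≥ 2 containing a non-digit character: on almost all of
-- these Python's int() raises ValueError on the first non-digit chunk it parses; on the rare
-- ones int() still tolerates (whitespace/underscore-padded digit chunks such as "010 ") A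
-- returns and B returns the same value, so the exclusion there only simplifies the condition.
def Pre_solve (s : String) : Prop :=
  s.toList.length ≤ 1 ∨ s.toList.all (fun c => c.isDigit) = true
instance (s : String) : Decidable (Pre_solve s) := by unfold Pre_solve; infer_instance
def pvWitness_solve : String := "1009"

def Spec_solve (s : String) (out : Bool) : Prop := out = solve_alt s
instance (s : String) (out : Bool) : Decidable (Spec_solve s out) := by unfold Spec_solve; infer_instance

-- ===== CLAIM (what is proved, stated in full; the proofs are below) =====
def Claim_equal_solve : Prop := ∀ (s : String), Dom_solve s → Pre_solve s → Spec_solve s (solve s)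

-- ===== LEMMAS AND PROOFS =====

theorem pv_any_congr {α : Type} (f g : α → Bool) :
    ∀ (l : List α), (∀ a ∈ l, f a = g a) → l.any f = l.any g := by
  intro l h
  induction l with
  | nil => rfl
  | cons a t ih =>
    simp only [List.any_cons, h a (by simp), ih (fun b hb => h b (by simp [hb]))]

-- A's helper on (prev, suffix of s from pos) equals B's loop with the parsed previous value.
theorem helper_eq_loop : ∀ (fuel : Nat) (s prev : List Char) (pos L : Nat),
    solveHelperA fuel prev (s.drop pos) L = solveLoopB fuel s (pyIntChunk prev) pos L := by
  intro fuel
  induction fuel with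
  | zero => intro s prev pos L; rfl
  | succ n ih =>
    intro s prev pos L
    show (if (s.drop pos).length = 0 then true else _) = (if pos < s.length then _ else true)
    by_cases hlt : pos < s.length
    · rw [if_pos hlt]
      have hdl : (s.drop pos).length = s.length - pos := by simp
      rw [if_neg (by rw [hdl]; omega : ¬ (s.drop pos).length = 0)]
      simp only [hdl]
      by_cases hc1 : s.length - pos < L - 1
      · rw [if_pos hc1, if_pos hc1]
      · rw [if_neg hc1, if_neg hc1]
        by_cases hc2 : L ≤ s.length - pos ∧
            pyIntChunk prev - pyIntChunk ((s.drop pos).take L) = 1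
        · rw [if_pos hc2, if_pos hc2, List.drop_drop]
          exact ih s ((s.drop pos).take L) (pos + L) L
        · rw [if_neg hc2, if_neg hc2]
          by_cases hc3 : L = 1
          · rw [if_pos hc3, if_pos hc3]
          · rw [if_neg hc3, if_neg hc3]
            by_cases hc4 : pyIntChunk prev - pyIntChunk ((s.drop pos).take (L - 1)) = 1
            · rw [if_pos hc4, if_pos hc4, List.drop_drop]
              exact ih s ((s.drop pos).take (L - 1)) (pos + (L - 1)) (L - 1)
            · rw [if_neg hc4, if_neg hc4]
    · have hle : s.length ≤ pos := by omega
      rw [if_neg hlt, if_pos (by rw [List.drop_eq_nil_of_le hle]; rfl)]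

theorem solve_eq_alt (s : String) : solve s = solve_alt s := by
  unfold solve solve_alt
  have hlen : s.toList.length / 2 + (if s.toList.length % 2 = 1 then 1 else 0)
      = (s.toList.length + 1) / 2 := by split_ifs with h <;> omega
  rw [hlen]
  apply pv_any_congr
  intro i hi
  by_cases hin : i < s.toList.length
  · rw [if_pos hin]
    exact helper_eq_loop (s.toList.length + 1) s.toList (s.toList.take i) i i
  · rw [if_neg hin, List.drop_eq_nil_of_le (by omega)]
    simp [solveHelperA]

-- ===== VERDICT (by name: the statement is the Claim_ definition above) =====
theorem solve_spec : Claim_equal_solve := by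
  intro s _ _
  unfold Spec_solve
  exact solve_eq_alt s
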